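-- pv_equiv track=rewrite | github.com/sarannetworkprogammer/DS_ALGO | Practise/carryforward/even_subarrays.py | all_subarrays
-- ===== SOURCE A (Python) =====
-- def print_subarray(start, end,A):
--     list1 = []
--     for i in range(start,end+1):
--         list1.append(A[i])
--
--     if (list1[0] % 2 != 0) and (list1[-1] % 2 !=0):
--         return "NO"
--
-- def all_subarrays(A):
--     n = len(A)
--
--     for i in range(0,n):
--         for j in range(i,n):
--             ans = print_subarray(i,j,A)
--             if ans == "NO":
--                 return "NO"
--
--     return "YES"
-- ===== SOURCE B (Python) =====
-- def all_subarrays(A):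
--     return "NO" if any(x % 2 != 0 for x in A) else "YES"
-- ===== Notes on version B (the rewrite author's own statement) =====
-- stated objective: simpler
-- what changed: A enumerates every (i,j) subarray and materialises each one to test its endpoints; B observes that a both-ends-odd subarray exists iff some element is odd (the single-element subarray), so it is one any() pass.
import Mathlib
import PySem

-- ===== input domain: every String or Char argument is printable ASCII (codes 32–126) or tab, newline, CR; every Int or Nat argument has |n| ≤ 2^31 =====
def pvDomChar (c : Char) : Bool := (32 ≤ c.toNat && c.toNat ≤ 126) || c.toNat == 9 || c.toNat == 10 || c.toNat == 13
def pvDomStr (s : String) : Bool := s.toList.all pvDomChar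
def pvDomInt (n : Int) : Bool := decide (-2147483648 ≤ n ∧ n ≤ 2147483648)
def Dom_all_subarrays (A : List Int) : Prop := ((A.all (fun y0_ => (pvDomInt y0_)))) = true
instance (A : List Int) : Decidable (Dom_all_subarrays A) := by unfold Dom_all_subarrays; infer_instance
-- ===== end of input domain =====

-- B replaces A's triple-nested subarray enumeration by a single any() pass (a both-ends-odd
-- subarray exists iff some element is odd); equivalence of the two is proved below.

-- ===== PORT A =====
-- A[i], list1[0], list1[-1]: ported with pyGetD (exact here: every index at every call site of
-- print_subarray inside the loops is in range, so Python never raises).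
def print_subarray (start stop : Int) (A : List Int) : Option String :=
  let list1 := (PySem.List.pyRange start (stop + 1) 1).foldl
      (fun acc i => acc ++ [PySem.List.pyGetD A i 0]) []
  if PySem.Int.mod (PySem.List.pyGetD list1 0 0) 2 ≠ 0 ∧
     PySem.Int.mod (PySem.List.pyGetD list1 (-1) 0) 2 ≠ 0 then
    some "NO"
  else
    none

-- inner 'for j in range(i, n)' with early return "NO"
def loopJ (A : List Int) (i : Int) : List Int → Option String
  | [] => none
  | j :: rest =>
      let ans := print_subarray i j A
      if ans = some "NO" then some "NO" else loopJ A i rest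

-- outer 'for i in range(0, n)', propagating the inner early return
def loopI (A : List Int) : List Int → Option String
  | [] => none
  | i :: rest =>
      match loopJ A i (PySem.List.pyRange i (A.length : Int) 1) with
      | some s => some s
      | none => loopI A rest

def all_subarrays (A : List Int) : String :=
  let n : Int := A.length
  match loopI A (PySem.List.pyRange 0 n 1) with
  | some s => s
  | none => "YES"

-- ===== PORT B =====
def all_subarrays_alt (A : List Int) : String :=
  if A.any (fun x => PySem.Int.mod x 2 != 0) then "NO" else "YES"

-- ===== PRECONDITION & SPEC =====
def Spec_all_subarrays (A : List Int) (out : String) : Prop := out = all_subarrays_alt A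
instance (A : List Int) (out : String) : Decidable (Spec_all_subarrays A out) := by unfold Spec_all_subarrays; infer_instance

-- ===== CLAIM (what is proved, stated in full; the proofs are below) =====
def Claim_equal_all_subarrays : Prop := ∀ (A : List Int), Dom_all_subarrays A → Spec_all_subarrays A (all_subarrays A)

-- ===== LEMMAS AND PROOFS =====

-- list1 is the map of A-lookups over the index range
theorem list1_eq_map (start stop : Int) (A : List Int) :
    (PySem.List.pyRange start (stop + 1) 1).foldl
      (fun acc i => acc ++ [PySem.List.pyGetD A i 0]) []
    = (PySem.List.pyRange start (stop + 1) 1).map (fun i => PySem.List.pyGetD A i 0) := by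
  simpa using PySem.List.foldl_append_singleton_eq_map (fun i => PySem.List.pyGetD A i 0) (PySem.List.pyRange start (stop + 1) 1) []

-- characterisation of print_subarray on the indices the loops actually supply
theorem print_subarray_char (i j : Int) (A : List Int)
    (hij : i ≤ j) :
    print_subarray i j A =
      (if PySem.Int.mod (PySem.List.pyGetD A i 0) 2 ≠ 0 ∧
          PySem.Int.mod (PySem.List.pyGetD A j 0) 2 ≠ 0
       then some "NO" else none) := by
  have h0 : PySem.List.pyGetD
      ((PySem.List.pyRange i (j + 1) 1).map (fun k => PySem.List.pyGetD A k 0)) 0 0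
      = PySem.List.pyGetD A i 0 := by
    rw [PySem.List.pyRange_one_cons (by omega : i < j + 1)]
    simp [PySem.List.pyGetD_zero_cons]
  have hlast : PySem.List.pyGetD
      ((PySem.List.pyRange i (j + 1) 1).map (fun k => PySem.List.pyGetD A k 0)) (-1) 0
      = PySem.List.pyGetD A j 0 := by
    rw [PySem.List.pyRange_one_succ_right hij]
    simp [List.map_append, PySem.List.pyGetD_neg_one_append_singleton]
  simp only [print_subarray, list1_eq_map, h0, hlast]

-- loopJ returns some "NO" exactly when some j in the list triggers print_subarray
theorem loopJ_char (A : List Int) (i : Int) (js : List Int) :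
    loopJ A i js =
      (if ∃ j ∈ js, print_subarray i j A = some "NO" then some "NO" else none) := by
  induction js with
  | nil => simp [loopJ]
  | cons j rest ih =>
      simp only [loopJ, ih]
      by_cases h : print_subarray i j A = some "NO"
      · simp [h]
      · simp [h]

theorem loopI_char (A : List Int) (is : List Int) :
    loopI A is =
      (if ∃ i ∈ is, ∃ j ∈ PySem.List.pyRange i (A.length : Int) 1, print_subarray i j A = some "NO"
       then some "NO" else none) := by
  induction is with
  | nil => simp [loopI]
  | cons i rest ih =>
      simp only [loopI, loopJ_char, ih, List.exists_mem_cons_iff]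
      by_cases h2 : ∃ j ∈ PySem.List.pyRange i (A.length : Int) 1, print_subarray i j A = some "NO"
      · rw [if_pos h2, if_pos (Or.inl h2)]
      · rw [if_neg h2]
        by_cases h3 : ∃ i ∈ rest, ∃ j ∈ PySem.List.pyRange i (A.length : Int) 1, print_subarray i j A = some "NO"
        · rw [if_pos h3, if_pos (Or.inr h3)]
        · rw [if_neg h3, if_neg (not_or.mpr ⟨h2, h3⟩)]

-- the double range contains a triggering pair iff A contains an odd element
theorem exists_pair_iff_odd (A : List Int) :
    (∃ i ∈ PySem.List.pyRange 0 (A.length : Int) 1,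
       ∃ j ∈ PySem.List.pyRange i (A.length : Int) 1, print_subarray i j A = some "NO")
    ↔ ∃ x ∈ A, PySem.Int.mod x 2 ≠ 0 := by
  constructor
  · rintro ⟨i, hi, j, hj, hp⟩
    rw [PySem.List.mem_pyRange_one] at hi hj
    rw [print_subarray_char i j A (by omega)] at hp
    by_cases hc : PySem.Int.mod (PySem.List.pyGetD A i 0) 2 ≠ 0 ∧
        PySem.Int.mod (PySem.List.pyGetD A j 0) 2 ≠ 0
    · refine ⟨PySem.List.pyGetD A i 0, ?_, hc.1⟩
      exact PySem.List.pyGetD_mem (xs := A) (i := i) (d := 0) (by simp [PySem.Raise.InRange]; omega)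
    · rw [if_neg hc] at hp
      exact absurd hp (by simp)
  · rintro ⟨x, hx, ho⟩
    obtain ⟨k, hk, hxk⟩ := List.mem_iff_getElem.mp hx
    have hkn : ((k : Int)) < (A.length : Int) := by exact_mod_cast hk
    have hmem : (k : Int) ∈ PySem.List.pyRange 0 (A.length : Int) 1 :=
      PySem.List.mem_pyRange_one.mpr ⟨by omega, hkn⟩
    have hmem2 : (k : Int) ∈ PySem.List.pyRange (k : Int) (A.length : Int) 1 :=
      PySem.List.mem_pyRange_one.mpr ⟨le_refl _, hkn⟩
    refine ⟨(k : Int), hmem, (k : Int), hmem2, ?_⟩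
    rw [print_subarray_char _ _ A (le_refl _)]
    have hg : PySem.List.pyGetD A (k : Int) 0 = x := by
      rw [PySem.List.pyGetD_natCast, List.getD_eq_getElem A 0 hk, hxk]
    rw [hg, if_pos ⟨ho, ho⟩]

-- ===== VERDICT (by name: the statement is the Claim_ definition above) =====
theorem all_subarrays_spec : Claim_equal_all_subarrays := by
  intro A _
  unfold Spec_all_subarrays all_subarrays_alt
  show (match loopI A (PySem.List.pyRange 0 ((A.length : Int)) 1) with
        | some s => s | none => "YES") =
      (if A.any (fun x => PySem.Int.mod x 2 != 0) then "NO" else "YES")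
  rw [loopI_char]
  by_cases hE : ∃ i ∈ PySem.List.pyRange 0 ((A.length : Int)) 1,
      ∃ j ∈ PySem.List.pyRange i ((A.length : Int)) 1, print_subarray i j A = some "NO"
  · rw [if_pos hE]
    obtain ⟨x, hx, ho⟩ := (exists_pair_iff_odd A).mp hE
    have hb : A.any (fun x => PySem.Int.mod x 2 != 0) = true :=
      List.any_eq_true.mpr ⟨x, hx, by simpa using ho⟩
    simp only [hb]
    rfl
  · rw [if_neg hE]
    have h : ¬ ∃ x ∈ A, PySem.Int.mod x 2 ≠ 0 := fun h => hE ((exists_pair_iff_odd A).mpr h)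
    have hb : A.any (fun x => PySem.Int.mod x 2 != 0) = false := by
      push Not at h
      simp only [List.any_eq_false]
      intro x hx
      simpa using h x hx
    simp only [hb]
    rfl
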